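-- pv_equiv track=rewrite | github.com/tiutiushkina-sofia/kse_pb | HW_4/main.py | build_display
-- ===== SOURCE A (Python) =====
-- def calculate_status(guess_word, correct_word, correct_length):
--     statuses=[]
--     index = 0
--     while index < correct_length:
--         character = guess_word[index]
--         if character == correct_word[index]:
--             statuses.append('correct')
--         elif character in correct_word:
--             statuses.append('present')
--         else:
--             statuses.append('absent')
--         index += 1
--     return statuses
--
-- def build_display(guess_word, correct_word, correct_length):
--     statuses = calculate_status(guess_word, correct_word, correct_length)
--     display = []
--     index = 0
--     while index < correct_length:
--         character = guess_word[index]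
--         status = statuses[index]
--         if status == 'correct':
--             display.append("["+character.upper()+"]")
--         elif status == 'present':
--             display.append("("+character+")")
--         else:
--             display.append(" "+character+" ")
--         index+=1
--     return display
-- ===== SOURCE B (Python) =====
-- def token(guess_char, correct_char, correct_word):
--     if guess_char == correct_char:
--         return "[" + guess_char.upper() + "]"
--     if guess_char in correct_word:
--         return "(" + guess_char + ")"
--     return " " + guess_char + " "
--
-- def build_display(guess_word, correct_word, correct_length):
--     return [token(guess_word[i], correct_word[i], correct_word)
--             for i in range(correct_length)]
-- ===== Notes on version B (the rewrite author's own statement) =====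
-- stated objective: simpler
-- what changed: Replaced A's two-pass design (a while loop building an intermediate 'statuses' string list, then a second while loop mapping statuses to tokens) with a pure per-character token helper applied in a single comprehension over range(correct_length); no status strings are ever materialized.
import Mathlib
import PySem

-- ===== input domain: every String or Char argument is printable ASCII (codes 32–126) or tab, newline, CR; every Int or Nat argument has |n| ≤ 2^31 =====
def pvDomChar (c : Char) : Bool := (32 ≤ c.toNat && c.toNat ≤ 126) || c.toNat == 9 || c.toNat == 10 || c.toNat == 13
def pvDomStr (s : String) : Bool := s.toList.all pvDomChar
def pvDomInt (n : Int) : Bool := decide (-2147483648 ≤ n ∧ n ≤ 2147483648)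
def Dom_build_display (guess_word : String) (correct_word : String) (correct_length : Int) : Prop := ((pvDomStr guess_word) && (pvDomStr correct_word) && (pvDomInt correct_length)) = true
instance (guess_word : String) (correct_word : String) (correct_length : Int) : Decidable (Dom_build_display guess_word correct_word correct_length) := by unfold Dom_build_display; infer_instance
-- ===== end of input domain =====

-- B replaces A's two sequential while-loops and intermediate statuses list with one
-- comprehension using a pure per-character token helper (objective: simpler).

-- ===== PORT A =====
-- helper calculate_status: while loop appending 'correct'/'present'/'absent'
def pvCalcStatus (g c : List Char) (n : Int) : List String :=
  (PySem.List.pyRange 0 n 1).foldl (fun statuses i =>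
    let ch := PySem.List.pyGetD g i ' '
    if ch = PySem.List.pyGetD c i ' ' then statuses ++ ["correct"]
    else if ch ∈ c then statuses ++ ["present"]
    else statuses ++ ["absent"]) []

def build_display (guess_word : String) (correct_word : String) (correct_length : Int) : List String :=
  let g := guess_word.toList
  let c := correct_word.toList
  let statuses := pvCalcStatus g c correct_length
  (PySem.List.pyRange 0 correct_length 1).foldl (fun d i =>
    let ch := PySem.List.pyGetD g i ' '
    let st := PySem.List.pyGetD statuses i ""
    if st = "correct" then d ++ [String.ofList ['[', PySem.Chars.upperChar ch, ']']]
    else if st = "present" then d ++ [String.ofList ['(', ch, ')']]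
    else d ++ [String.ofList [' ', ch, ' ']]) []

-- ===== PORT B =====
def pvToken (guess_char correct_char : Char) (correct_word : List Char) : String :=
  if guess_char = correct_char then String.ofList ['[', PySem.Chars.upperChar guess_char, ']']
  else if guess_char ∈ correct_word then String.ofList ['(', guess_char, ')']
  else String.ofList [' ', guess_char, ' ']

def build_display_alt (guess_word : String) (correct_word : String) (correct_length : Int) : List String :=
  (PySem.List.pyRange 0 correct_length 1).map (fun i =>
    pvToken (PySem.List.pyGetD guess_word.toList i ' ')
            (PySem.List.pyGetD correct_word.toList i ' ') correct_word.toList)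

-- ===== PRECONDITION & SPEC =====
-- Pre_ excludes exactly the inputs where A raises IndexError: correct_length exceeding
-- the length of guess_word or of correct_word.
def Pre_build_display (guess_word : String) (correct_word : String) (correct_length : Int) : Prop :=
  correct_length ≤ (guess_word.toList.length : Int) ∧ correct_length ≤ (correct_word.toList.length : Int)
instance (guess_word : String) (correct_word : String) (correct_length : Int) : Decidable (Pre_build_display guess_word correct_word correct_length) := by unfold Pre_build_display; infer_instance

def pvWitness_build_display : String × String × Int := ("crane", "crate", 5)

def Spec_build_display (guess_word : String) (correct_word : String) (correct_length : Int) (out : List String) : Prop := out = build_display_alt guess_word correct_word correct_length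
instance (guess_word : String) (correct_word : String) (correct_length : Int) (out : List String) : Decidable (Spec_build_display guess_word correct_word correct_length out) := by unfold Spec_build_display; infer_instance

-- ===== CLAIM (what is proved, stated in full; the proofs are below) =====
def Claim_equal_build_display : Prop := ∀ (guess_word : String) (correct_word : String) (correct_length : Int), Dom_build_display guess_word correct_word correct_length → Pre_build_display guess_word correct_word correct_length → Spec_build_display guess_word correct_word correct_length (build_display guess_word correct_word correct_length)

-- ===== LEMMAS AND PROOFS =====

-- statuses as a map over the range
lemma pvCalcStatus_eq_map (g c : List Char) (n : Int) :
    pvCalcStatus g c n = (PySem.List.pyRange 0 n 1).map (fun i =>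
      if PySem.List.pyGetD g i ' ' = PySem.List.pyGetD c i ' ' then "correct"
      else if PySem.List.pyGetD g i ' ' ∈ c then "present" else "absent") := by
  unfold pvCalcStatus
  have h : (fun (statuses : List String) (i : Int) =>
      let ch := PySem.List.pyGetD g i ' '
      if ch = PySem.List.pyGetD c i ' ' then statuses ++ ["correct"]
      else if ch ∈ c then statuses ++ ["present"]
      else statuses ++ ["absent"]) =
      (fun statuses i => statuses ++ [if PySem.List.pyGetD g i ' ' = PySem.List.pyGetD c i ' ' then "correct"
        else if PySem.List.pyGetD g i ' ' ∈ c then "present" else "absent"]) := by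
    funext d i; dsimp only; split_ifs <;> rfl
  rw [h, PySem.List.foldl_append_singleton_eq_map]
  simp

-- the display loop as a map over the range
lemma build_display_eq_map (guess_word correct_word : String) (n : Int) :
    build_display guess_word correct_word n =
      (PySem.List.pyRange 0 n 1).map (fun i =>
        let ch := PySem.List.pyGetD guess_word.toList i ' '
        let st := PySem.List.pyGetD (pvCalcStatus guess_word.toList correct_word.toList n) i ""
        if st = "correct" then String.ofList ['[', PySem.Chars.upperChar ch, ']']
        else if st = "present" then String.ofList ['(', ch, ')']
        else String.ofList [' ', ch, ' ']) := by
  unfold build_display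
  dsimp only
  have h : (fun (d : List String) (i : Int) =>
      let ch := PySem.List.pyGetD guess_word.toList i ' '
      let st := PySem.List.pyGetD (pvCalcStatus guess_word.toList correct_word.toList n) i ""
      if st = "correct" then d ++ [String.ofList ['[', PySem.Chars.upperChar ch, ']']]
      else if st = "present" then d ++ [String.ofList ['(', ch, ')']]
      else d ++ [String.ofList [' ', ch, ' ']]) =
      (fun d i => d ++ [
        let ch := PySem.List.pyGetD guess_word.toList i ' '
        let st := PySem.List.pyGetD (pvCalcStatus guess_word.toList correct_word.toList n) i ""
        if st = "correct" then String.ofList ['[', PySem.Chars.upperChar ch, ']']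
        else if st = "present" then String.ofList ['(', ch, ')']
        else String.ofList [' ', ch, ' ']]) := by
    funext d i; dsimp only; split_ifs <;> rfl
  rw [h, PySem.List.foldl_append_singleton_eq_map]
  simp

-- ===== VERDICT (by name: the statement is the Claim_ definition above) =====
theorem build_display_spec : Claim_equal_build_display := by
  intro gw cw n _hdom hpre
  unfold Spec_build_display build_display_alt
  rw [build_display_eq_map]
  apply List.map_congr_left
  intro i hi
  rw [PySem.List.mem_pyRange_one] at hi
  dsimp only
  rw [pvCalcStatus_eq_map,
      PySem.List.pyGetD_map_pyRange_of_nonneg _ n i _ hi.1 hi.2]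
  unfold pvToken
  split_ifs with h1 h2 <;> simp_all
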